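-- pv_equiv track=rewrite | github.com/MrBrantCode/unitest_baseline | mut_generate/mist_train_cf/cf_6615/solution.py | find_unique_names
-- ===== SOURCE A (Python) =====
-- def find_unique_names(names):
--     unique_names = []
--     for name in names:
--         if len(name) > 6:
--             is_unique = True
--             for i in range(len(name)):
--                 for j in range(i + 1, len(name)):
--                     if name[i] == name[j]:
--                         is_unique = False
--                         break
--                 if not is_unique:
--                     break
--             if is_unique:
--                 unique_names.append(name)
--     return set(unique_names)
-- ===== SOURCE B (Python) =====
-- def find_unique_names(names):
--     result = set()
--     for name in names:
--         if len(name) > 6: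
--             cs = sorted(name)
--             if all(cs[k] != cs[k + 1] for k in range(len(cs) - 1)):
--                 result.add(name)
--     return result
-- ===== Notes on version B (the rewrite author's own statement) =====
-- stated objective: alternative
-- what changed: Replaces the nested all-pairs index scan with sort-then-adjacent-equal duplicate detection, adding qualifying names to a set directly instead of appending to a list and converting at the end.
import Mathlib
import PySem

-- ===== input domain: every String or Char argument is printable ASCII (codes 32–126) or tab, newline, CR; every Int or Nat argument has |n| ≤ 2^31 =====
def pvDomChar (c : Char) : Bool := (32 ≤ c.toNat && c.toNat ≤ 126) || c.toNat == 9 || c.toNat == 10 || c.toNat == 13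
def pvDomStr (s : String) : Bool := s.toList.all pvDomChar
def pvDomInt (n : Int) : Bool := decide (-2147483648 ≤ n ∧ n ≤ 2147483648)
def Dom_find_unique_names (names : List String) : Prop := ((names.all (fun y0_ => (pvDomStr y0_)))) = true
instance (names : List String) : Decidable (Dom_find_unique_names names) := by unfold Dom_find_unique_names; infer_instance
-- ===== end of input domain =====

-- B detects duplicate characters by sorting and one adjacent-equal scan instead of A's
-- nested all-pairs index loops, and adds names to the result set directly (objective: alternative).

-- ===== PORT A =====
-- A's inner loops: for each position i, scan positions j > i for a character equal to
-- name[i], breaking out as soon as one is found; ported as recursion on the suffix.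
def pvPairScan : List Char → Bool
  | [] => true
  | c :: rest => if rest.contains c then false else pvPairScan rest

def find_unique_names (names : List String) : List String :=
  PySem.Set.ofList
    (names.foldl
      (fun unique_names name =>
        if 6 < name.toList.length then
          (if pvPairScan name.toList then unique_names ++ [name] else unique_names)
        else unique_names)
      [])

-- ===== PORT B =====
-- all(cs[k] != cs[k+1] for k in range(len(cs)-1)): one adjacent pass over the sorted chars
def pvAdjDistinct : List Char → Bool
  | [] => true
  | [_] => true
  | a :: b :: t => a ≠ b && pvAdjDistinct (b :: t)

def find_unique_names_alt (names : List String) : List String :=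
  names.foldl
    (fun result name =>
      if 6 < name.toList.length then
        (if pvAdjDistinct (PySem.List.sorted name.toList (fun x => x) false) then
          PySem.Set.add result name
        else result)
      else result)
    []

-- ===== PRECONDITION & SPEC =====
def Spec_find_unique_names (names : List String) (out : List String) : Prop := out = find_unique_names_alt names
instance (names : List String) (out : List String) : Decidable (Spec_find_unique_names names out) := by unfold Spec_find_unique_names; infer_instance

-- ===== CLAIM (what is proved, stated in full; the proofs are below) =====
def Claim_equal_find_unique_names : Prop := ∀ (names : List String), Dom_find_unique_names names → Spec_find_unique_names names (find_unique_names names)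

-- ===== LEMMAS AND PROOFS =====

lemma pvPairScan_iff_nodup (cs : List Char) : pvPairScan cs = true ↔ cs.Nodup := by
  induction cs with
  | nil => simp [pvPairScan]
  | cons c rest ih => simp [pvPairScan, ih, List.nodup_cons]

lemma pvAdjDistinct_iff_nodup (cs : List Char)
    (h : cs.Pairwise (· ≤ ·)) : pvAdjDistinct cs = true ↔ cs.Nodup := by
  induction cs with
  | nil => simp [pvAdjDistinct]
  | cons a t ih =>
    cases t with
    | nil => simp [pvAdjDistinct]
    | cons b t' =>
      rw [List.pairwise_cons] at h
      obtain ⟨hab, ht⟩ := h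
      have ih' := ih ht
      simp only [pvAdjDistinct, Bool.and_eq_true, ih', decide_eq_true_eq]
      constructor
      · rintro ⟨hne, hnd⟩
        have halt : a < b := lt_of_le_of_ne (hab b (by simp)) hne
        rw [List.nodup_cons]
        refine ⟨?_, hnd⟩
        intro hmem
        rcases List.mem_cons.mp hmem with rfl | hx
        · exact hne rfl
        · rw [List.pairwise_cons] at ht
          exact absurd halt (not_lt_of_ge (ht.1 a hx))
      · intro hnd
        rw [List.nodup_cons] at hnd
        exact ⟨fun h => hnd.1 (by simp [h]), hnd.2⟩

lemma pvScan_eq (cs : List Char) :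
    pvPairScan cs = pvAdjDistinct (PySem.List.sorted cs (fun x => x) false) := by
  rw [Bool.eq_iff_iff, pvPairScan_iff_nodup,
    pvAdjDistinct_iff_nodup _ (PySem.List.sorted_pairwise cs (fun x => x)),
    (PySem.List.sorted_perm cs (fun x => x) false).nodup_iff]

-- ===== VERDICT (by name: the statement is the Claim_ definition above) =====
theorem find_unique_names_spec : Claim_equal_find_unique_names := by
  intro names _
  show find_unique_names names = find_unique_names_alt names
  unfold find_unique_names find_unique_names_alt
  simp only [pvScan_eq]
  rw [PySem.Set.ofList_eq_foldl]
  have hA := PySem.List.foldl_append_if_eq_filter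
    (p := fun name : String =>
      6 < name.toList.length &&
        pvAdjDistinct (PySem.List.sorted name.toList (fun x => x) false))
    (l := names) (acc := ([] : List String))
  have hB := PySem.List.foldl_if_eq_foldl_filter
    (p := fun name : String =>
      6 < name.toList.length &&
        pvAdjDistinct (PySem.List.sorted name.toList (fun x => x) false))
    (f := PySem.Set.add) (l := names) (init := ([] : List String))
  rw [show (fun (unique_names : List String) (name : String) =>
        if 6 < name.toList.length then
          (if pvAdjDistinct (PySem.List.sorted name.toList (fun x => x) false) then
            unique_names ++ [name] else unique_names)
        else unique_names) =
      (fun acc name =>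
        if (6 < name.toList.length &&
            pvAdjDistinct (PySem.List.sorted name.toList (fun x => x) false)) then
          acc ++ [name] else acc) by
    funext acc name; split_ifs <;> simp_all <;> omega]
  rw [hA,
    show (fun (result : List String) (name : String) =>
        if 6 < name.toList.length then
          (if pvAdjDistinct (PySem.List.sorted name.toList (fun x => x) false) then
            PySem.Set.add result name else result)
        else result) =
      (fun result name =>
        if (6 < name.toList.length &&
            pvAdjDistinct (PySem.List.sorted name.toList (fun x => x) false)) then
          PySem.Set.add result name else result) by
    funext result name; split_ifs <;> simp_all <;> omega,
    hB]
  simp
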